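-- pv_equiv track=rewrite | github.com/dnskrslnkv/algo | LinearSearch/short words.py | shortwords
-- ===== SOURCE A (Python) =====
-- def shortwords(words):
--     ans = []
--     min_len = len(words[0])
--     for word in words:
--         if len(word) < min_len:
--             min_len = len(word)
--
--     for word in words:
--         if len(word) == min_len:
--             ans.append(word)
--
--     return ' '.join(ans)
-- ===== SOURCE B (Python) =====
-- def shortwords(words):
--     groups = {}
--     for word in words:
--         groups.setdefault(len(word), []).append(word)
--     return ' '.join(groups[min(groups)])
-- ===== Notes on version B (the rewrite author's own statement) =====
-- stated objective: alternative
-- what changed: Replaces A's two scans (one to find the minimum length, one to filter words of that length) by a single grouping pass into a length-keyed dict of buckets followed by a min-key lookup.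
import Mathlib
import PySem

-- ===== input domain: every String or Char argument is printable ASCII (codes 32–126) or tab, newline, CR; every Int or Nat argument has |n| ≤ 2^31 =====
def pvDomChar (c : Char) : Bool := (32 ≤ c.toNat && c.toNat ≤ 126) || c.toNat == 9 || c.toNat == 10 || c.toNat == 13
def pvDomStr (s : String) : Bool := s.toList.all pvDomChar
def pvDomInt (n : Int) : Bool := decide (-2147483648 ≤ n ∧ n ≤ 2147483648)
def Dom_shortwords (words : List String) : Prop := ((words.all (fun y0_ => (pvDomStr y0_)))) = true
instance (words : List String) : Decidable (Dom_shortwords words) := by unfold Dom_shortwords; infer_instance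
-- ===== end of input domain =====

-- B replaces A's two scans (min-length scan, then filter scan) with one grouping pass
-- into a length-keyed dict of buckets plus a min-key lookup (objective: alternative).

-- ===== PORT A =====
def shortwords (words : List String) : String :=
  match PySem.List.pyGet? words 0 with
  | none => ""   -- IndexError on the empty list; excluded by Pre_shortwords
  | some w0 =>
    let minLen := words.foldl (fun m w => if PySem.Str.len w < m then PySem.Str.len w else m)
      (PySem.Str.len w0)
    let ans := words.foldl (fun acc w => if PySem.Str.len w == minLen then acc ++ [w] else acc)
      ([] : List String)
    PySem.Str.join " " ans

-- ===== PORT B =====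
def shortwords_alt (words : List String) : String :=
  let groups := words.foldl
    (fun d w => d.modify (PySem.Str.len w) [] (· ++ [w]))   -- groups.setdefault(len(word), []).append(word)
    (PySem.Dict.empty : PySem.Dict Int (List String))
  match PySem.List.min? groups.keys (fun k => k) with   -- min(groups)
  | none => ""   -- ValueError on the empty dict; excluded by Pre_shortwords
  | some k =>
    match groups.get? k with   -- groups[...]
    | some bucket => PySem.Str.join " " bucket
    | none => ""   -- KeyError; unreachable (the minimum key is a key)

-- ===== PRECONDITION & SPEC =====
-- Pre_ excludes only the empty list, on which A raises IndexError (words[0]) and B raises ValueError (min of empty dict).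
def Pre_shortwords (words : List String) : Prop := words ≠ []
instance (words : List String) : Decidable (Pre_shortwords words) := by unfold Pre_shortwords; infer_instance
def pvWitness_shortwords : List String := (["ab", "c", "de", "f"])
def Spec_shortwords (words : List String) (out : String) : Prop := out = shortwords_alt words
instance (words : List String) (out : String) : Decidable (Spec_shortwords words out) := by unfold Spec_shortwords; infer_instance

-- ===== CLAIM (what is proved, stated in full; the proofs are below) =====
def Claim_equal_shortwords : Prop := ∀ (words : List String), Dom_shortwords words → Pre_shortwords words → Spec_shortwords words (shortwords words)

-- ===== LEMMAS AND PROOFS =====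

-- A's first loop: the result is the start value or some word's length, and bounds both below.
theorem min_fold_spec (xs : List String) (a : Int) :
    (xs.foldl (fun m w => if PySem.Str.len w < m then PySem.Str.len w else m) a = a ∨
      ∃ w ∈ xs, xs.foldl (fun m w => if PySem.Str.len w < m then PySem.Str.len w else m) a = PySem.Str.len w) ∧
    xs.foldl (fun m w => if PySem.Str.len w < m then PySem.Str.len w else m) a ≤ a ∧
    ∀ w ∈ xs, xs.foldl (fun m w => if PySem.Str.len w < m then PySem.Str.len w else m) a ≤ PySem.Str.len w := by
  induction xs generalizing a with
  | nil => exact ⟨Or.inl rfl, le_refl _, by simp⟩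
  | cons x t ih =>
    simp only [List.foldl_cons]
    by_cases h : PySem.Str.len x < a
    · simp only [if_pos h]
      obtain ⟨hm, hle, hall⟩ := ih (PySem.Str.len x)
      refine ⟨?_, le_trans hle (le_of_lt h), ?_⟩
      · rcases hm with h1 | ⟨w, hw, hE⟩
        · exact Or.inr ⟨x, by simp, h1⟩
        · exact Or.inr ⟨w, by simp [hw], hE⟩
      · intro w hw
        rcases (List.mem_cons).1 hw with rfl | hw'
        · exact hle
        · exact hall w hw'
    · simp only [if_neg h]
      obtain ⟨hm, hle, hall⟩ := ih a
      refine ⟨?_, hle, ?_⟩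
      · rcases hm with h1 | ⟨w, hw, hE⟩
        · exact Or.inl h1
        · exact Or.inr ⟨w, by simp [hw], hE⟩
      · intro w hw
        rcases (List.mem_cons).1 hw with rfl | hw'
        · exact le_trans hle (not_lt.1 h)
        · exact hall w hw'

-- B's grouping loop: the bucket at k is the filter of the words of length k, in order.
theorem bucket_spec (ws : List String) (d : PySem.Dict Int (List String)) (k : Int) :
    (ws.foldl (fun d w => d.modify (PySem.Str.len w) [] (· ++ [w])) d).getD k [] =
      d.getD k [] ++ ws.filter (fun w => PySem.Str.len w == k) := by
  induction ws generalizing d with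
  | nil => simp
  | cons w t ih =>
    simp only [List.foldl_cons, List.filter_cons]
    rw [ih, PySem.Dict.getD_modify]
    by_cases h : k = ((w.length : Int))
    · simp [PySem.Str.len, h]
    · simp [PySem.Str.len, h]
      omega

-- B's grouping loop: the keys are exactly the lengths occurring in ws (plus d's keys).
theorem keys_spec (ws : List String) (d : PySem.Dict Int (List String)) (k : Int) :
    (k ∈ (ws.foldl (fun d w => d.modify (PySem.Str.len w) [] (· ++ [w])) d).keys) ↔
      (k ∈ d.keys ∨ ∃ w ∈ ws, PySem.Str.len w = k) := by
  induction ws generalizing d with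
  | nil => simp
  | cons w t ih =>
    simp only [List.foldl_cons]
    rw [ih, ← PySem.Dict.contains_iff_mem_keys, PySem.Dict.contains_modify]
    simp only [Bool.or_eq_true, beq_iff_eq, PySem.Dict.contains_iff_mem_keys, List.mem_cons]
    constructor
    · rintro ((rfl | hd) | ⟨w', hw', hE⟩)
      · exact Or.inr ⟨w, Or.inl rfl, rfl⟩
      · exact Or.inl hd
      · exact Or.inr ⟨w', Or.inr hw', hE⟩
    · rintro (hd | ⟨w', (rfl | hw'), hE⟩)
      · exact Or.inl (Or.inr hd)
      · exact Or.inl (Or.inl hE.symm)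
      · exact Or.inr ⟨w', hw', hE⟩

-- ===== VERDICT (by name: the statement is the Claim_ definition above) =====
theorem shortwords_spec : Claim_equal_shortwords := by
  intro words _ hpre
  obtain ⟨w0, ws, rfl⟩ := List.exists_cons_of_ne_nil hpre
  unfold Spec_shortwords shortwords shortwords_alt
  have hget : PySem.List.pyGet? (w0 :: ws) 0 = some w0 := by
    simp [PySem.List.pyGet?, PySem.List.pyIdx?]
  rw [hget]
  show PySem.Str.join " "
      ((w0 :: ws).foldl
        (fun acc w => if PySem.Str.len w ==
            (w0 :: ws).foldl (fun m w => if PySem.Str.len w < m then PySem.Str.len w else m) (PySem.Str.len w0)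
          then acc ++ [w] else acc) ([] : List String)) =
    (match PySem.List.min?
        ((w0 :: ws).foldl (fun d w => d.modify (PySem.Str.len w) [] (· ++ [w]))
          (PySem.Dict.empty : PySem.Dict Int (List String))).keys (fun k => k) with
      | none => ""
      | some k =>
        match ((w0 :: ws).foldl (fun d w => d.modify (PySem.Str.len w) [] (· ++ [w]))
            (PySem.Dict.empty : PySem.Dict Int (List String))).get? k with
        | some bucket => PySem.Str.join " " bucket
        | none => "")
  obtain ⟨hmem, -, hlow⟩ := min_fold_spec (w0 :: ws) (PySem.Str.len w0)
  have hmemL : ∃ w ∈ (w0 :: ws),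
      (w0 :: ws).foldl (fun m w => if PySem.Str.len w < m then PySem.Str.len w else m) (PySem.Str.len w0)
        = PySem.Str.len w := by
    rcases hmem with h1 | h2
    · exact ⟨w0, by simp, h1⟩
    · exact h2
  have hkeys : ∀ k : Int,
      k ∈ ((w0 :: ws).foldl (fun d w => d.modify (PySem.Str.len w) [] (· ++ [w]))
        (PySem.Dict.empty : PySem.Dict Int (List String))).keys ↔ ∃ w ∈ (w0 :: ws), PySem.Str.len w = k := by
    intro k; rw [keys_spec]; simp
  have hmk : (w0 :: ws).foldl (fun m w => if PySem.Str.len w < m then PySem.Str.len w else m) (PySem.Str.len w0)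
      ∈ ((w0 :: ws).foldl (fun d w => d.modify (PySem.Str.len w) [] (· ++ [w]))
        (PySem.Dict.empty : PySem.Dict Int (List String))).keys := by
    obtain ⟨w, hw, hE⟩ := hmemL
    exact (hkeys _).2 ⟨w, hw, hE.symm⟩
  cases hmin : PySem.List.min?
      ((w0 :: ws).foldl (fun d w => d.modify (PySem.Str.len w) [] (· ++ [w]))
        (PySem.Dict.empty : PySem.Dict Int (List String))).keys (fun k => k) with
  | none =>
    rw [(PySem.List.min?_eq_none_iff _ _).1 hmin] at hmk
    simp at hmk
  | some k =>
    have hkmem := PySem.List.min?_mem hmin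
    have hkm : k = (w0 :: ws).foldl (fun m w => if PySem.Str.len w < m then PySem.Str.len w else m) (PySem.Str.len w0) := by
      obtain ⟨w, hw, hE⟩ := (hkeys k).1 hkmem
      have h1 := PySem.List.min?_isMin hmin _ hmk
      have h2 := hlow w hw
      simp only at h1
      omega
    simp only
    rw [PySem.List.foldl_append_if_eq_filter, ← hkm]
    cases hgk : ((w0 :: ws).foldl (fun d w => d.modify (PySem.Str.len w) [] (· ++ [w]))
        (PySem.Dict.empty : PySem.Dict Int (List String))).get? k with
    | none =>
      rw [PySem.Dict.get?_eq_none_iff_contains] at hgk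
      rw [← PySem.Dict.contains_iff_mem_keys, hgk] at hkmem
      simp at hkmem
    | some bucket =>
      have hb : bucket = ((w0 :: ws).foldl (fun d w => d.modify (PySem.Str.len w) [] (· ++ [w]))
          (PySem.Dict.empty : PySem.Dict Int (List String))).getD k [] := by
        rw [PySem.Dict.getD_eq_get?_getD, hgk]; rfl
      rw [hb, bucket_spec]
      simp
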